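-- pv_equiv track=rewrite | github.com/monijuan/leetcode_python | code/AC3_hard/2132. 用邮票贴满网格图.py | possibleToStamp
-- ===== SOURCE A (Python) =====
-- from typing import List
--
-- def possibleToStamp(grid: List[List[int]], stampHeight: int, stampWidth: int) -> bool:
--     height, width = len(grid), len(grid[0])
--     sum = [[0] * (width + 1) for _ in range(height + 1)]
--     diff = [[0] * (width + 1) for _ in range(height + 1)]
--
--     # 二维前缀和
--     for i, row in enumerate(grid):
--         for j, v in enumerate(row):
--             sum[i + 1][j + 1] = sum[i + 1][j] + sum[i][j + 1] - sum[i][j] + v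
--
--     # 更新二维差分
--     for i, row in enumerate(grid):
--         for j, v in enumerate(row):
--             if v == 0:
--                 x, y = i + stampHeight, j + stampWidth  # 注意这是矩形右下角横纵坐标都 +1 后的位置
--                 if x <= height and y <= width and sum[x][y] - sum[x][j] - sum[i][y] + sum[i][j] == 0:
--                     diff[i][j] += 1
--                     diff[i][y] -= 1
--                     diff[x][j] -= 1
--                     diff[x][y] += 1
--
--     # 用滚动数组还原二维差分矩阵对应的计数矩阵
--     cnt, pre = [0] * (width + 1), [0] * (width + 1)
--     for i, row in enumerate(grid):
--         for j, v in enumerate(row):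
--             cnt[j + 1] = cnt[j] + pre[j + 1] - pre[j] + diff[i][j]
--             if cnt[j + 1] == 0 and v == 0:
--                 return False
--         cnt, pre = pre, cnt
--     return True
-- ===== SOURCE B (Python) =====
-- from typing import List
--
-- def _prefix2d(h, w, f):
--     # (h+1) x (w+1) table of 2D prefix sums of f over [0,h) x [0,w)
--     t = [[0] * (w + 1) for _ in range(h + 1)]
--     for i in range(h):
--         for j in range(w):
--             t[i + 1][j + 1] = t[i + 1][j] + t[i][j + 1] - t[i][j] + f(i, j)
--     return t
--
-- def possibleToStamp(grid: List[List[int]], stampHeight: int, stampWidth: int) -> bool: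
--     h, w = len(grid), len(grid[0])
--
--     def cell(i, j):
--         # a missing cell of a ragged row cannot be stamped on and needs no cover: treat as filled
--         row = grid[i]
--         return row[j] if j < len(row) else 1
--
--     # prefix sums of the grid, to test whether a rectangle is entirely empty
--     s = _prefix2d(h, w, cell)
--
--     # ok(a, b): a stamp placed with top-left corner (a, b) fits and covers only empty cells
--     def ok(a, b):
--         x, y = a + stampHeight, b + stampWidth
--         if cell(a, b) == 0 and x <= h and y <= w and s[x][y] - s[x][b] - s[a][y] + s[a][b] == 0:
--             return 1
--         return 0
--
--     # prefix sums of the 0/1 matrix of valid placements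
--     v = _prefix2d(h, w, ok)
--
--     # every empty cell must lie under at least one valid placement:
--     # the placements covering (i, j) have top-left in [max(0,i-H+1), i] x [max(0,j-W+1), j]
--     for i in range(h):
--         for j in range(w):
--             if cell(i, j) == 0:
--                 a0, b0 = max(0, i - stampHeight + 1), max(0, j - stampWidth + 1)
--                 if v[i + 1][j + 1] - v[a0][j + 1] - v[i + 1][b0] + v[a0][b0] == 0:
--                     return False
--     return True
-- ===== Notes on version B (the rewrite author's own statement) =====
-- stated objective: alternative
-- what changed: B drops A's difference-array + rolling-1D restoration entirely: it builds a 0/1 matrix of valid stamp placements, takes its 2D prefix sums with a generic helper, and decides each empty cell by one O(1) rectangle-count query over the placement window, in a separate final pass.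
-- outside the precondition, e.g. on possibleToStamp([[1, 3, 0, 0], [3]], 2, 2): A returns True, B returns False; on possibleToStamp([[0], [0]], -1, 1): A returns False, B raises IndexError; on possibleToStamp([[0, 0]], 1, -1): A returns False, B raises IndexError
import Mathlib
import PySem

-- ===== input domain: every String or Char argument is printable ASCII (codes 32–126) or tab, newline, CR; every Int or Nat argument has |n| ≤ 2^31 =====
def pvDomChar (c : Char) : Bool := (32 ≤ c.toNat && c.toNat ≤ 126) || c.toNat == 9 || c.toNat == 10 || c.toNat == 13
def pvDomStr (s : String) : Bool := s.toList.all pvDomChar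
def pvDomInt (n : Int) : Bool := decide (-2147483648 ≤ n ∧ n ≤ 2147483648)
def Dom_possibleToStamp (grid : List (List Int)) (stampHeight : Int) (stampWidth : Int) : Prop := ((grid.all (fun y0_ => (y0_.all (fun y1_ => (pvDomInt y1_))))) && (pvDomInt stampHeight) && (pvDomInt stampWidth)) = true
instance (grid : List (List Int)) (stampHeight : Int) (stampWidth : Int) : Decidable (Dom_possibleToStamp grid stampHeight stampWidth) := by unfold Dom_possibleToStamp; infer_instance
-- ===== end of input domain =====

-- B replaces A's difference-array marking and rolling-1D restoration by a 0/1 matrix of valid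
-- placements whose 2D prefix sums answer, per empty cell, one rectangle-count query (objective:
-- alternative decomposition, same asymptotic cost).

-- shared 2D-table helpers (Python's t[i][j] read / t[i][j] = v assignment on list-of-lists)
def pvGet2 (t : List (List Int)) (i j : Nat) : Int := (t.getD i []).getD j 0
def pvSet2 (t : List (List Int)) (i j : Nat) (v : Int) : List (List Int) :=
  t.set i ((t.getD i []).set j v)
def pvZeros2 (h w : Nat) : List (List Int) := List.replicate h (List.replicate w 0)

-- ===== PORT A =====
-- for i,row in enumerate(grid): for j,v in enumerate(row): sum[i+1][j+1] = …
def pvAsumRow (i : Nat) : Nat → List Int → List (List Int) → List (List Int)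
  | _, [], s => s
  | j, v :: vs, s =>
    pvAsumRow i (j+1) vs
      (pvSet2 s (i+1) (j+1) (pvGet2 s (i+1) j + pvGet2 s i (j+1) - pvGet2 s i j + v))

def pvAsumRows : Nat → List (List Int) → List (List Int) → List (List Int)
  | _, [], s => s
  | i, row :: rows, s => pvAsumRows (i+1) rows (pvAsumRow i 0 row s)

-- the diff-marking double loop (four corner updates when the stamp fits on empty cells)
def pvAdiffRow (height width : Nat) (sh sw : Int) (sum : List (List Int)) (i : Nat) :
    Nat → List Int → List (List Int) → List (List Int)
  | _, [], d => d
  | j, v :: vs, d =>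
    pvAdiffRow height width sh sw sum i (j+1) vs
      (if v = 0 then
        if (i : Int) + sh ≤ (height : Int) ∧ (j : Int) + sw ≤ (width : Int) ∧
            pvGet2 sum ((i : Int) + sh).toNat ((j : Int) + sw).toNat -
              pvGet2 sum ((i : Int) + sh).toNat j - pvGet2 sum i ((j : Int) + sw).toNat +
              pvGet2 sum i j = 0 then
          let d1 := pvSet2 d i j (pvGet2 d i j + 1)
          let d2 := pvSet2 d1 i ((j : Int) + sw).toNat (pvGet2 d1 i ((j : Int) + sw).toNat - 1)
          let d3 := pvSet2 d2 ((i : Int) + sh).toNat j (pvGet2 d2 ((i : Int) + sh).toNat j - 1)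
          pvSet2 d3 ((i : Int) + sh).toNat ((j : Int) + sw).toNat
            (pvGet2 d3 ((i : Int) + sh).toNat ((j : Int) + sw).toNat + 1)
        else d
      else d)

def pvAdiffRows (height width : Nat) (sh sw : Int) (sum : List (List Int)) :
    Nat → List (List Int) → List (List Int) → List (List Int)
  | _, [], d => d
  | i, row :: rows, d =>
    pvAdiffRows height width sh sw sum (i+1) rows (pvAdiffRow height width sh sw sum i 0 row d)

-- rolling restoration: cnt[j+1] = cnt[j] + pre[j+1] - pre[j] + diff[i][j]; early `return False`
def pvArestRow (diff : List (List Int)) (i : Nat) :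
    Nat → List Int → List Int → List Int → Option (List Int)
  | _, [], cnt, _ => some cnt
  | j, v :: vs, cnt, pre =>
    let c := cnt.getD j 0 + pre.getD (j+1) 0 - pre.getD j 0 + pvGet2 diff i j
    if c = 0 ∧ v = 0 then none
    else pvArestRow diff i (j+1) vs (cnt.set (j+1) c) pre

def pvArestRows (diff : List (List Int)) :
    Nat → List (List Int) → List Int → List Int → Bool
  | _, [], _, _ => true
  | i, row :: rows, cnt, pre =>
    match pvArestRow diff i 0 row cnt pre with
    | none => false
    | some cnt' => pvArestRows diff (i+1) rows pre cnt'   -- cnt, pre = pre, cnt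

def possibleToStamp (grid : List (List Int)) (stampHeight : Int) (stampWidth : Int) : Bool :=
  let height := grid.length
  let width := (grid.getD 0 []).length
  let sum := pvAsumRows 0 grid (pvZeros2 (height+1) (width+1))
  let diff := pvAdiffRows height width stampHeight stampWidth sum 0 grid
                (pvZeros2 (height+1) (width+1))
  pvArestRows diff 0 grid (List.replicate (width+1) 0) (List.replicate (width+1) 0)

-- ===== PORT B =====
-- cell(i, j): grid[i][j], with a missing cell of a ragged row read as filled (1)
def pvG1 (grid : List (List Int)) (i j : Nat) : Int := (grid.getD i []).getD j 1

-- _prefix2d(h, w, f): (h+1)×(w+1) table of 2D prefix sums of f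
def pvPrefFill (h w : Nat) (f : Nat → Nat → Int) : List (List Int) :=
  (List.range h).foldl
    (fun t i => (List.range w).foldl
      (fun t j =>
        pvSet2 t (i+1) (j+1) (pvGet2 t (i+1) j + pvGet2 t i (j+1) - pvGet2 t i j + f i j)) t)
    (pvZeros2 (h+1) (w+1))

-- ok(a, b): the stamp with top-left (a, b) fits and covers only empty cells (s = prefix sums of grid)
def pvOkTab (grid : List (List Int)) (h w : Nat) (s : List (List Int)) (sh sw : Int)
    (a b : Nat) : Int :=
  if pvG1 grid a b = 0 ∧ (a : Int) + sh ≤ (h : Int) ∧ (b : Int) + sw ≤ (w : Int) ∧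
      pvGet2 s ((a : Int) + sh).toNat ((b : Int) + sw).toNat -
        pvGet2 s ((a : Int) + sh).toNat b - pvGet2 s a ((b : Int) + sw).toNat +
        pvGet2 s a b = 0
  then 1 else 0

def possibleToStamp_alt (grid : List (List Int)) (stampHeight : Int) (stampWidth : Int) : Bool :=
  let h := grid.length
  let w := (grid.getD 0 []).length
  let s := pvPrefFill h w (pvG1 grid)
  let v := pvPrefFill h w (pvOkTab grid h w s stampHeight stampWidth)
  (List.range h).all fun i => (List.range w).all fun j =>
    if pvG1 grid i j = 0 then
      let a0 := (max 0 ((i : Int) - stampHeight + 1)).toNat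
      let b0 := (max 0 ((j : Int) - stampWidth + 1)).toNat
      pvGet2 v (i+1) (j+1) - pvGet2 v a0 (j+1) - pvGet2 v (i+1) b0 + pvGet2 v a0 b0 != 0
    else true

-- ===== PRECONDITION & SPEC =====
-- Pre_ excludes the empty grid (A raises IndexError on grid[0]), grids with a row longer than the
-- first (A raises IndexError), and — except when the grid has no empty cell at all, where both
-- programs trivially succeed — ragged grids (A's half-filled prefix-sum table silently reads
-- leftover zeros for missing cells) and negative stamp dimensions (A reads its tables through
-- negative-index wraparound).
def Pre_possibleToStamp (grid : List (List Int)) (stampHeight : Int) (stampWidth : Int) : Prop :=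
  grid ≠ [] ∧ (∀ row ∈ grid, row.length ≤ (grid.headD []).length) ∧
    ((∀ row ∈ grid, row.length = (grid.headD []).length) ∧ 0 ≤ stampHeight ∧ 0 ≤ stampWidth
      ∨ (∀ row ∈ grid, ∀ x ∈ row, x ≠ 0))
instance (grid : List (List Int)) (stampHeight : Int) (stampWidth : Int) :
    Decidable (Pre_possibleToStamp grid stampHeight stampWidth) := by
  unfold Pre_possibleToStamp; infer_instance

def pvWitness_possibleToStamp : List (List Int) × Int × Int := ([[0, 0, 3], [0, 0, 0]], 1, 2)

def Spec_possibleToStamp (grid : List (List Int)) (stampHeight : Int) (stampWidth : Int) (out : Bool) : Prop := out = possibleToStamp_alt grid stampHeight stampWidth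
instance (grid : List (List Int)) (stampHeight : Int) (stampWidth : Int) (out : Bool) : Decidable (Spec_possibleToStamp grid stampHeight stampWidth out) := by unfold Spec_possibleToStamp; infer_instance

-- ===== CLAIM (what is proved, stated in full; the proofs are below) =====
def Claim_equal_possibleToStamp : Prop := ∀ (grid : List (List Int)) (stampHeight : Int) (stampWidth : Int), Dom_possibleToStamp grid stampHeight stampWidth → Pre_possibleToStamp grid stampHeight stampWidth → Spec_possibleToStamp grid stampHeight stampWidth (possibleToStamp grid stampHeight stampWidth)

-- ===== LEMMAS AND PROOFS =====

-- mathematical model: 2D prefix sums of a function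
def pvPS2 (f : Nat → Nat → Int) (p q : Nat) : Int :=
  ∑ a ∈ Finset.range p, ∑ b ∈ Finset.range q, f a b

def pvShaped (t : List (List Int)) (h w : Nat) : Prop :=
  t.length = h + 1 ∧ ∀ r ∈ t, r.length = w + 1

-- state of the prefix-sum fill after rows < k are done and row k is done up to column c
def pvFilled (f : Nat → Nat → Int) (h w k c : Nat) (t : List (List Int)) : Prop :=
  pvShaped t h w ∧ ∀ p q, pvGet2 t p q =
    if (p ≤ k ∨ (p = k + 1 ∧ q ≤ c)) ∧ p ≤ h ∧ q ≤ w then pvPS2 f p q else 0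

-- the valid-placement indicator, the diff corner deltas, and the restored counts, as functions
def pvOkI (g : Nat → Nat → Int) (h w : Nat) (sh sw : Int) (a b : Nat) : Int :=
  if g a b = 0 ∧ (a : Int) + sh ≤ (h : Int) ∧ (b : Int) + sw ≤ (w : Int) ∧
      pvPS2 g ((a : Int) + sh).toNat ((b : Int) + sw).toNat -
        pvPS2 g ((a : Int) + sh).toNat b - pvPS2 g a ((b : Int) + sw).toNat + pvPS2 g a b = 0
  then 1 else 0

def pvDelta (sh sw : Int) (a b p q : Nat) : Int :=
  ((if p = a then 1 else 0) - (if p = ((a : Int) + sh).toNat then 1 else 0)) *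
  ((if q = b then 1 else 0) - (if q = ((b : Int) + sw).toNat then 1 else 0))

def pvDpart (g : Nat → Nat → Int) (h w : Nat) (sh sw : Int) (i j p q : Nat) : Int :=
  (∑ a ∈ Finset.range i, ∑ b ∈ Finset.range w,
      pvOkI g h w sh sw a b * pvDelta sh sw a b p q) +
  ∑ b ∈ Finset.range j, pvOkI g h w sh sw i b * pvDelta sh sw i b p q

def pvDfull (g : Nat → Nat → Int) (h w : Nat) (sh sw : Int) (p q : Nat) : Int :=
  pvDpart g h w sh sw h 0 p q

def pvDState (g : Nat → Nat → Int) (h w : Nat) (sh sw : Int) (i j : Nat)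
    (t : List (List Int)) : Prop :=
  pvShaped t h w ∧ ∀ p q, pvGet2 t p q =
    if p ≤ h ∧ q ≤ w then pvDpart g h w sh sw i j p q else 0

-- restored coverage counts: pvC … i q = Σ_{p<i} Σ_{b<q} diff[p][b]
def pvC (g : Nat → Nat → Int) (h w : Nat) (sh sw : Int) : Nat → Nat → Int :=
  pvPS2 (pvDfull g h w sh sw)

theorem pvPS2_zero_left (f : Nat → Nat → Int) (q : Nat) : pvPS2 f 0 q = 0 := by
  simp [pvPS2]

theorem pvPS2_zero_right (f : Nat → Nat → Int) (p : Nat) : pvPS2 f p 0 = 0 := by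
  simp [pvPS2]

theorem pvPS2_rec (f : Nat → Nat → Int) (p q : Nat) :
    pvPS2 f (p+1) (q+1) = pvPS2 f (p+1) q + pvPS2 f p (q+1) - pvPS2 f p q + f p q := by
  simp [pvPS2, Finset.sum_range_succ, Finset.sum_add_distrib]
  ring

theorem pvGet2_zeros (h w p q : Nat) : pvGet2 (pvZeros2 h w) p q = 0 := by
  simp only [pvGet2, pvZeros2, List.getD_eq_getElem?_getD, List.getElem?_replicate]
  split_ifs <;> simp [List.getD_eq_getElem?_getD, List.getElem?_replicate] <;> split_ifs <;> rfl

theorem pvShaped_zeros (h w : Nat) : pvShaped (pvZeros2 (h+1) (w+1)) h w := by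
  refine ⟨by simp [pvZeros2], ?_⟩
  intro r hr
  simp only [pvZeros2] at hr
  rw [List.eq_of_mem_replicate hr]
  simp

theorem pvRepl0 (n q : Nat) : (List.replicate n (0:Int)).getD q 0 = 0 := by
  rw [List.getD_eq_getElem?_getD, List.getElem?_replicate]
  split_ifs <;> rfl

theorem pvRowD (t : List (List Int)) (i : Nat) (hi : i < t.length) : t.getD i [] = t[i] := by
  rw [List.getD_eq_getElem?_getD, List.getElem?_eq_getElem hi]; rfl

theorem pvShaped_set2 (t : List (List Int)) (h w a b : Nat) (v : Int)
    (hs : pvShaped t h w) (ha : a ≤ h) : pvShaped (pvSet2 t a b v) h w := by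
  obtain ⟨hlen, hrow⟩ := hs
  have hal : a < t.length := by omega
  constructor
  · simpa [pvSet2] using hlen
  · intro r hr
    simp only [pvSet2] at hr
    rcases List.mem_or_eq_of_mem_set hr with hr | hr
    · exact hrow r hr
    · subst hr
      rw [List.length_set, pvRowD t a hal]
      exact hrow _ (List.getElem_mem hal)

theorem pvGet2_set2 (t : List (List Int)) (h w a b : Nat) (v : Int)
    (hs : pvShaped t h w) (ha : a ≤ h) (hb : b ≤ w) (p q : Nat) :
    pvGet2 (pvSet2 t a b v) p q = if p = a ∧ q = b then v else pvGet2 t p q := by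
  obtain ⟨hlen, hrow⟩ := hs
  have hal : a < t.length := by omega
  have hrlen : (t.getD a []).length = w + 1 := by
    rw [pvRowD t a hal]; exact hrow _ (List.getElem_mem hal)
  have hbl : b < (t.getD a []).length := by omega
  simp only [pvGet2, pvSet2, List.getD_eq_getElem?_getD]
  rw [List.getElem?_set]
  by_cases hpa : a = p
  · subst hpa
    rw [if_pos rfl, if_pos hal]
    simp only [Option.getD_some]
    rw [List.getElem?_set]
    by_cases hqb : b = q
    · subst hqb
      rw [if_pos rfl, if_pos (show b < (t[a]?.getD []).length by
        rw [← List.getD_eq_getElem?_getD]; exact hbl)]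
      simp
    · rw [if_neg hqb, if_neg (fun hc => hqb hc.2.symm)]
  · rw [if_neg hpa, if_neg (fun hc => hpa hc.1.symm)]

theorem pvGet2_bump (t : List (List Int)) (h w a b : Nat) (c : Int)
    (hs : pvShaped t h w) (ha : a ≤ h) (hb : b ≤ w) (p q : Nat) :
    pvGet2 (pvSet2 t a b (pvGet2 t a b + c)) p q
      = pvGet2 t p q + (if p = a ∧ q = b then c else 0) := by
  rw [pvGet2_set2 t h w a b _ hs ha hb]
  by_cases hpq : p = a ∧ q = b
  · obtain ⟨h1, h2⟩ := hpq; subst h1; subst h2; simp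
  · simp [hpq]

theorem pvGet2_bump_sub (t : List (List Int)) (h w a b : Nat) (c : Int)
    (hs : pvShaped t h w) (ha : a ≤ h) (hb : b ≤ w) (p q : Nat) :
    pvGet2 (pvSet2 t a b (pvGet2 t a b - c)) p q
      = pvGet2 t p q - (if p = a ∧ q = b then c else 0) := by
  rw [pvGet2_set2 t h w a b _ hs ha hb]
  by_cases hpq : p = a ∧ q = b
  · obtain ⟨h1, h2⟩ := hpq; subst h1; subst h2; simp
  · simp [hpq]

-- one fill step preserves the pvFilled invariant
theorem pvFilled_step (f : Nat → Nat → Int) (h w i c : Nat) (t : List (List Int))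
    (hi : i < h) (hc : c < w) (ht : pvFilled f h w i c t) :
    pvFilled f h w i (c+1)
      (pvSet2 t (i+1) (c+1) (pvGet2 t (i+1) c + pvGet2 t i (c+1) - pvGet2 t i c + f i c)) := by
  obtain ⟨hs, hget⟩ := ht
  have hwrite : pvGet2 t (i+1) c + pvGet2 t i (c+1) - pvGet2 t i c + f i c
      = pvPS2 f (i+1) (c+1) := by
    rw [hget (i+1) c, hget i (c+1), hget i c,
      if_pos (by omega : ((i+1 ≤ i ∨ (i+1 = i + 1 ∧ c ≤ c)) ∧ i+1 ≤ h ∧ c ≤ w)),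
      if_pos (by omega : ((i ≤ i ∨ (i = i + 1 ∧ c+1 ≤ c)) ∧ i ≤ h ∧ c+1 ≤ w)),
      if_pos (by omega : ((i ≤ i ∨ (i = i + 1 ∧ c ≤ c)) ∧ i ≤ h ∧ c ≤ w)), pvPS2_rec]
  refine ⟨pvShaped_set2 t h w (i+1) (c+1) _ hs (by omega), ?_⟩
  intro p q
  rw [pvGet2_set2 t h w (i+1) (c+1) _ hs (by omega) (by omega)]
  by_cases hpq : p = i+1 ∧ q = c+1
  · rw [if_pos hpq]
    obtain ⟨h1, h2⟩ := hpq; subst h1; subst h2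
    rw [hwrite, if_pos (by omega)]
  · rw [if_neg hpq, hget p q]
    split_ifs <;> first | rfl | omega

-- row rollover: the invariant after a full row is the invariant before the next row
theorem pvFilled_next (f : Nat → Nat → Int) (h w i : Nat) (t : List (List Int))
    (ht : pvFilled f h w i w t) : pvFilled f h w (i+1) 0 t := by
  obtain ⟨hs, hget⟩ := ht
  refine ⟨hs, ?_⟩
  intro p q
  rw [hget p q]
  by_cases hc : p = i + 2 ∧ q = 0
  · obtain ⟨h1, h2⟩ := hc; subst h1; subst h2
    split_ifs <;> simp [pvPS2]
  · split_ifs <;> first | rfl | omega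

theorem pvFilled_zero (f : Nat → Nat → Int) (h w : Nat) :
    pvFilled f h w 0 0 (pvZeros2 (h+1) (w+1)) := by
  refine ⟨pvShaped_zeros h w, ?_⟩
  intro p q
  rw [pvGet2_zeros]
  split_ifs with hc
  · obtain ⟨hc1, -, -⟩ := hc
    rcases hc1 with hp | ⟨hp, hq⟩
    · have hp0 : p = 0 := by omega
      subst hp0; simp [pvPS2]
    · subst hp
      have hq0 : q = 0 := by omega
      subst hq0; simp [pvPS2]
  · rfl

theorem pvPrefFill_inner (f : Nat → Nat → Int) (h w i : Nat) (hi : i < h) :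
    ∀ c, c ≤ w → ∀ t, pvFilled f h w i 0 t →
      pvFilled f h w i c ((List.range c).foldl
        (fun t j =>
          pvSet2 t (i+1) (j+1) (pvGet2 t (i+1) j + pvGet2 t i (j+1) - pvGet2 t i j + f i j)) t) := by
  intro c
  induction c with
  | zero => intro _ t ht; simpa using ht
  | succ c ih =>
    intro hc t ht
    rw [List.range_succ, List.foldl_append]
    simp only [List.foldl_cons, List.foldl_nil]
    exact pvFilled_step f h w i c _ hi (by omega) (ih (by omega) t ht)

theorem pvPrefFill_outer (f : Nat → Nat → Int) (h w : Nat) :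
    ∀ k, k ≤ h →
      pvFilled f h w k 0 ((List.range k).foldl
        (fun t i => (List.range w).foldl
          (fun t j =>
            pvSet2 t (i+1) (j+1) (pvGet2 t (i+1) j + pvGet2 t i (j+1) - pvGet2 t i j + f i j)) t)
        (pvZeros2 (h+1) (w+1))) := by
  intro k
  induction k with
  | zero => intro _; simpa using pvFilled_zero f h w
  | succ k ih =>
    intro hk
    rw [List.range_succ, List.foldl_append]
    simp only [List.foldl_cons, List.foldl_nil]
    exact pvFilled_next f h w k _ (pvPrefFill_inner f h w k (by omega) w le_rfl _ (ih (by omega)))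

theorem pvPrefFill_char (f : Nat → Nat → Int) (h w : Nat) :
    pvFilled f h w h 0 (pvPrefFill h w f) := by
  simpa [pvPrefFill] using pvPrefFill_outer f h w h le_rfl

theorem pvFilled_get (f : Nat → Nat → Int) (h w : Nat) (t : List (List Int))
    (ht : pvFilled f h w h 0 t) (p q : Nat) (hp : p ≤ h) (hq : q ≤ w) :
    pvGet2 t p q = pvPS2 f p q := by
  rcases ht with ⟨-, hget⟩
  rw [hget]
  rw [if_pos (by omega)]

-- peeling one element off `l.drop j`
theorem pvDrop_cons {α : Type} (l : List α) (d : α) (j : Nat) (v : α) (vs : List α)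
    (hd : l.drop j = v :: vs) : j < l.length ∧ l.getD j d = v ∧ l.drop (j+1) = vs := by
  have hj : j < l.length := by
    by_contra hle
    rw [List.drop_eq_nil_iff.mpr (by omega)] at hd
    exact (List.cons_ne_nil _ _) hd.symm
  refine ⟨hj, ?_, ?_⟩
  · have h0 : (l.drop j)[0]? = some v := by rw [hd]; rfl
    rw [List.getElem?_drop] at h0
    rw [List.getD_eq_getElem?_getD]
    simp only [Nat.add_zero] at h0
    rw [h0]; rfl
  · have hdd := List.drop_drop (i := 1) (j := j) (l := l)
    rw [← hdd, hd]; rfl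

theorem pvRow_mem (grid : List (List Int)) (i : Nat) (hi : i < grid.length) :
    grid.getD i [] ∈ grid := by
  rw [pvRowD grid i hi]
  exact List.getElem_mem hi

-- A's hand-rolled prefix-sum loops compute the same table states
theorem pvAsumRow_char (grid : List (List Int)) (h w i : Nat)
    (hh : h = grid.length) (hw : ∀ row ∈ grid, row.length = w) (hi : i < h) :
    ∀ (vs : List Int) (j : Nat) (t : List (List Int)),
      vs = (grid.getD i []).drop j → j ≤ w → pvFilled (pvG1 grid) h w i j t →
      pvFilled (pvG1 grid) h w i w (pvAsumRow i j vs t) := by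
  have hlen : (grid.getD i []).length = w := hw _ (pvRow_mem grid i (by omega))
  intro vs
  induction vs with
  | nil =>
    intro j t hvs hj ht
    have hjw : j = w := by
      have := List.drop_eq_nil_iff.mp hvs.symm
      omega
    subst hjw
    simpa [pvAsumRow] using ht
  | cons v vs ih =>
    intro j t hvs hj ht
    obtain ⟨hjl, hv, hdrop⟩ := pvDrop_cons _ 1 j v vs hvs.symm
    have hjw : j < w := by omega
    have hvg : v = pvG1 grid i j := hv.symm
    simp only [pvAsumRow]
    apply ih (j+1) _ hdrop.symm (by omega)
    rw [hvg]
    exact pvFilled_step (pvG1 grid) h w i j t hi hjw ht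

theorem pvAsumRows_char (grid : List (List Int)) (h w : Nat)
    (hh : h = grid.length) (hw : ∀ row ∈ grid, row.length = w) :
    ∀ (rows : List (List Int)) (i : Nat) (t : List (List Int)),
      rows = grid.drop i → i ≤ h → pvFilled (pvG1 grid) h w i 0 t →
      pvFilled (pvG1 grid) h w h 0 (pvAsumRows i rows t) := by
  intro rows
  induction rows with
  | nil =>
    intro i t hr hi ht
    have hih : i = h := by
      have := List.drop_eq_nil_iff.mp hr.symm
      omega
    subst hih
    simpa [pvAsumRows] using ht
  | cons row rows ih =>
    intro i t hr hi ht
    obtain ⟨hil, hrow, hdrop⟩ := pvDrop_cons grid [] i row rows hr.symm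
    have hih : i < h := by omega
    simp only [pvAsumRows]
    apply ih (i+1) _ hdrop.symm (by omega)
    apply pvFilled_next
    exact pvAsumRow_char grid h w i hh hw hih row 0 t (by rw [List.drop_zero]; exact hrow.symm) (by omega) ht

-- the diff loops build the table of summed corner deltas
theorem pvDpart_col (g : Nat → Nat → Int) (h w : Nat) (sh sw : Int) (i j p q : Nat) :
    pvDpart g h w sh sw i (j+1) p q
      = pvDpart g h w sh sw i j p q + pvOkI g h w sh sw i j * pvDelta sh sw i j p q := by
  simp [pvDpart, Finset.sum_range_succ]
  omega

theorem pvDpart_row (g : Nat → Nat → Int) (h w : Nat) (sh sw : Int) (i p q : Nat) :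
    pvDpart g h w sh sw i w p q = pvDpart g h w sh sw (i+1) 0 p q := by
  simp [pvDpart, Finset.sum_range_succ]

theorem pvDState_next (g : Nat → Nat → Int) (h w : Nat) (sh sw : Int) (i : Nat)
    (t : List (List Int)) (ht : pvDState g h w sh sw i w t) :
    pvDState g h w sh sw (i+1) 0 t := by
  obtain ⟨hs, hget⟩ := ht
  refine ⟨hs, fun p q => ?_⟩
  rw [hget p q]
  split_ifs with hc
  · rw [pvDpart_row]
  · rfl

theorem pvDState_zero (g : Nat → Nat → Int) (h w : Nat) (sh sw : Int) :
    pvDState g h w sh sw 0 0 (pvZeros2 (h+1) (w+1)) := by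
  refine ⟨pvShaped_zeros h w, fun p q => ?_⟩
  rw [pvGet2_zeros]
  split_ifs <;> simp [pvDpart]

theorem pvDelta_expand (sh sw : Int) (a b p q : Nat) :
    pvDelta sh sw a b p q =
      (if p = a ∧ q = b then 1 else 0) - (if p = a ∧ q = ((b:Int)+sw).toNat then 1 else 0)
      - (if p = ((a:Int)+sh).toNat ∧ q = b then 1 else 0)
      + (if p = ((a:Int)+sh).toNat ∧ q = ((b:Int)+sw).toNat then 1 else 0) := by
  simp only [pvDelta]
  split_ifs <;> first | omega | norm_num

theorem pvAdiffRow_char (grid : List (List Int)) (h w : Nat) (sh sw : Int)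
    (sum : List (List Int)) (i : Nat)
    (hh : h = grid.length) (hw : ∀ row ∈ grid, row.length = w)
    (hsh : 0 ≤ sh) (hsw : 0 ≤ sw)
    (hsum : ∀ p q, p ≤ h → q ≤ w → pvGet2 sum p q = pvPS2 (pvG1 grid) p q)
    (hi : i < h) :
    ∀ (vs : List Int) (j : Nat) (t : List (List Int)),
      vs = (grid.getD i []).drop j → j ≤ w → pvDState (pvG1 grid) h w sh sw i j t →
      pvDState (pvG1 grid) h w sh sw i w (pvAdiffRow h w sh sw sum i j vs t) := by
  have hlen : (grid.getD i []).length = w := hw _ (pvRow_mem grid i (by omega))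
  intro vs
  induction vs with
  | nil =>
    intro j t hvs hj ht
    have hjw : j = w := by
      have := List.drop_eq_nil_iff.mp hvs.symm
      omega
    subst hjw
    simpa [pvAdiffRow] using ht
  | cons v vs ih =>
    intro j t hvs hj ht
    obtain ⟨hjl, hv, hdrop⟩ := pvDrop_cons _ 1 j v vs hvs.symm
    have hjw : j < w := by omega
    have hvg : pvG1 grid i j = v := hv
    simp only [pvAdiffRow]
    apply ih (j+1) _ hdrop.symm (by omega)
    obtain ⟨hs, hget⟩ := ht
    have hEe : (i:Int) + sh ≤ (h:Int) → (j:Int) + sw ≤ (w:Int) →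
        pvGet2 sum ((i:Int)+sh).toNat ((j:Int)+sw).toNat - pvGet2 sum ((i:Int)+sh).toNat j -
          pvGet2 sum i ((j:Int)+sw).toNat + pvGet2 sum i j
        = pvPS2 (pvG1 grid) ((i:Int)+sh).toNat ((j:Int)+sw).toNat -
            pvPS2 (pvG1 grid) ((i:Int)+sh).toNat j - pvPS2 (pvG1 grid) i ((j:Int)+sw).toNat +
            pvPS2 (pvG1 grid) i j := by
      intro h1 h2
      rw [hsum _ _ (by omega) (by omega), hsum _ _ (by omega) (by omega),
        hsum _ _ (by omega) (by omega), hsum _ _ (by omega) (by omega)]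
    by_cases hv0 : v = 0
    · rw [if_pos hv0]
      by_cases hcond : (i:Int) + sh ≤ (h:Int) ∧ (j:Int) + sw ≤ (w:Int) ∧
          pvGet2 sum ((i:Int)+sh).toNat ((j:Int)+sw).toNat - pvGet2 sum ((i:Int)+sh).toNat j -
            pvGet2 sum i ((j:Int)+sw).toNat + pvGet2 sum i j = 0
      · rw [if_pos hcond]
        obtain ⟨h1, h2, h3⟩ := hcond
        have hok1 : pvOkI (pvG1 grid) h w sh sw i j = 1 := by
          rw [pvOkI, if_pos ⟨by rw [hvg]; exact hv0, h1, h2, by rw [← hEe h1 h2]; exact h3⟩]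
        have hXh : ((i:Int)+sh).toNat ≤ h := by omega
        have hYw : ((j:Int)+sw).toNat ≤ w := by omega
        set d1 := pvSet2 t i j (pvGet2 t i j + 1) with hd1
        set d2 := pvSet2 d1 i ((j:Int)+sw).toNat (pvGet2 d1 i ((j:Int)+sw).toNat - 1) with hd2
        set d3 := pvSet2 d2 ((i:Int)+sh).toNat j (pvGet2 d2 ((i:Int)+sh).toNat j - 1) with hd3
        have hs1 : pvShaped d1 h w := pvShaped_set2 t h w i j _ hs (by omega)
        have hs2 : pvShaped d2 h w :=
          pvShaped_set2 d1 h w i ((j:Int)+sw).toNat _ hs1 (by omega)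
        have hs3 : pvShaped d3 h w :=
          pvShaped_set2 d2 h w ((i:Int)+sh).toNat j _ hs2 hXh
        have hs4 : pvShaped (pvSet2 d3 ((i:Int)+sh).toNat ((j:Int)+sw).toNat
            (pvGet2 d3 ((i:Int)+sh).toNat ((j:Int)+sw).toNat + 1)) h w :=
          pvShaped_set2 d3 h w ((i:Int)+sh).toNat ((j:Int)+sw).toNat _ hs3 hXh
        refine ⟨hs4, fun p q => ?_⟩
        rw [pvGet2_bump d3 h w ((i:Int)+sh).toNat ((j:Int)+sw).toNat 1 hs3 hXh hYw, hd3,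
          pvGet2_bump_sub d2 h w ((i:Int)+sh).toNat j 1 hs2 hXh (by omega), hd2,
          pvGet2_bump_sub d1 h w i ((j:Int)+sw).toNat 1 hs1 (by omega) hYw, hd1,
          pvGet2_bump t h w i j 1 hs (by omega) (by omega), hget p q, pvDpart_col, hok1,
          one_mul, pvDelta_expand]
        by_cases hin : p ≤ h ∧ q ≤ w
        · rw [if_pos hin, if_pos hin]
          ring
        · rw [if_neg hin, if_neg hin,
            if_neg (by omega : ¬(p = i ∧ q = j)),
            if_neg (by omega : ¬(p = i ∧ q = ((j:Int)+sw).toNat)),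
            if_neg (by omega : ¬(p = ((i:Int)+sh).toNat ∧ q = j)),
            if_neg (by omega : ¬(p = ((i:Int)+sh).toNat ∧ q = ((j:Int)+sw).toNat))]
          ring
      · rw [if_neg hcond]
        have hok0 : pvOkI (pvG1 grid) h w sh sw i j = 0 := by
          rw [pvOkI, if_neg]
          rintro ⟨-, h1, h2, h3⟩
          exact hcond ⟨h1, h2, by rw [hEe h1 h2]; exact h3⟩
        refine ⟨hs, fun p q => ?_⟩
        rw [hget p q, pvDpart_col, hok0, zero_mul, add_zero]
    · rw [if_neg hv0]
      have hok0 : pvOkI (pvG1 grid) h w sh sw i j = 0 := by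
        rw [pvOkI, if_neg]
        rintro ⟨h0, -, -, -⟩
        exact hv0 (by rw [← hvg]; exact h0)
      refine ⟨hs, fun p q => ?_⟩
      rw [hget p q, pvDpart_col, hok0, zero_mul, add_zero]

theorem pvAdiffRows_char (grid : List (List Int)) (h w : Nat) (sh sw : Int)
    (sum : List (List Int))
    (hh : h = grid.length) (hw : ∀ row ∈ grid, row.length = w)
    (hsh : 0 ≤ sh) (hsw : 0 ≤ sw)
    (hsum : ∀ p q, p ≤ h → q ≤ w → pvGet2 sum p q = pvPS2 (pvG1 grid) p q) :
    ∀ (rows : List (List Int)) (i : Nat) (t : List (List Int)),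
      rows = grid.drop i → i ≤ h → pvDState (pvG1 grid) h w sh sw i 0 t →
      pvDState (pvG1 grid) h w sh sw h 0 (pvAdiffRows h w sh sw sum i rows t) := by
  intro rows
  induction rows with
  | nil =>
    intro i t hr hi ht
    have hih : i = h := by
      have := List.drop_eq_nil_iff.mp hr.symm
      omega
    subst hih
    simpa [pvAdiffRows] using ht
  | cons row rows ih =>
    intro i t hr hi ht
    obtain ⟨hil, hrow, hdrop⟩ := pvDrop_cons grid [] i row rows hr.symm
    have hih : i < h := by omega
    simp only [pvAdiffRows]
    apply ih (i+1) _ hdrop.symm (by omega)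
    apply pvDState_next
    exact pvAdiffRow_char grid h w sh sw sum i hh hw hsh hsw hsum hih row 0 t
      (by rw [List.drop_zero]; exact hrow.symm) (by omega) ht

-- the rolling restoration scans for an empty cell with zero coverage, row by row
theorem pvArestRow_char (grid : List (List Int)) (h w : Nat) (sh sw : Int)
    (diff : List (List Int)) (i : Nat)
    (hh : h = grid.length) (hw : ∀ row ∈ grid, row.length = w)
    (hdiff : ∀ p q, p ≤ h → q ≤ w → pvGet2 diff p q = pvDfull (pvG1 grid) h w sh sw p q)
    (hi : i < h) :
    ∀ (vs : List Int) (j : Nat) (cnt pre : List Int),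
      vs = (grid.getD i []).drop j → j ≤ w →
      cnt.length = w + 1 → (∀ q ≤ j, cnt.getD q 0 = pvC (pvG1 grid) h w sh sw (i+1) q) →
      pre.length = w + 1 → (∀ q ≤ w, pre.getD q 0 = pvC (pvG1 grid) h w sh sw i q) →
      (pvArestRow diff i j vs cnt pre = none ↔
        ∃ k, j ≤ k ∧ k < w ∧ pvG1 grid i k = 0 ∧ pvC (pvG1 grid) h w sh sw (i+1) (k+1) = 0) ∧
      (∀ cnt', pvArestRow diff i j vs cnt pre = some cnt' →
        cnt'.length = w + 1 ∧ ∀ q ≤ w, cnt'.getD q 0 = pvC (pvG1 grid) h w sh sw (i+1) q) := by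
  have hlen : (grid.getD i []).length = w := hw _ (pvRow_mem grid i (by omega))
  intro vs
  induction vs with
  | nil =>
    intro j cnt pre hvs hj hcl hcv hpl hpv
    have hjw : j = w := by
      have := List.drop_eq_nil_iff.mp hvs.symm
      omega
    subst hjw
    constructor
    · constructor
      · intro hc
        exact absurd hc (by simp [pvArestRow])
      · rintro ⟨k, hk1, hk2, -⟩
        exact absurd hk2 (by omega)
    · intro cnt' hc
      have hc' : cnt = cnt' := by simpa [pvArestRow] using hc
      subst hc'
      exact ⟨hcl, hcv⟩
  | cons v vs ih =>
    intro j cnt pre hvs hj hcl hcv hpl hpv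
    obtain ⟨hjl, hv, hdrop⟩ := pvDrop_cons _ 1 j v vs hvs.symm
    have hjw : j < w := by omega
    have hvg : pvG1 grid i j = v := hv
    have hcval : cnt.getD j 0 + pre.getD (j+1) 0 - pre.getD j 0 + pvGet2 diff i j
        = pvC (pvG1 grid) h w sh sw (i+1) (j+1) := by
      rw [hcv j le_rfl, hpv (j+1) (by omega), hpv j (by omega),
        hdiff i j (by omega) (by omega)]
      exact (pvPS2_rec (pvDfull (pvG1 grid) h w sh sw) i j).symm
    simp only [pvArestRow]
    by_cases hstop : cnt.getD j 0 + pre.getD (j+1) 0 - pre.getD j 0 + pvGet2 diff i j = 0 ∧ v = 0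
    · rw [if_pos hstop]
      refine ⟨⟨fun _ => ⟨j, le_rfl, hjw, by rw [hvg]; exact hstop.2,
        by rw [← hcval]; exact hstop.1⟩, fun _ => rfl⟩,
        fun cnt' hc => nomatch hc⟩
    · rw [if_neg hstop]
      have hcl' : (cnt.set (j+1) (cnt.getD j 0 + pre.getD (j+1) 0 - pre.getD j 0 +
          pvGet2 diff i j)).length = w + 1 := by
        rw [List.length_set]; exact hcl
      have hcv' : ∀ q ≤ j+1, (cnt.set (j+1) (cnt.getD j 0 + pre.getD (j+1) 0 - pre.getD j 0 +
          pvGet2 diff i j)).getD q 0 = pvC (pvG1 grid) h w sh sw (i+1) q := by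
        intro q hq
        rw [List.getD_eq_getElem?_getD, List.getElem?_set]
        by_cases hq1 : j + 1 = q
        · subst hq1
          rw [if_pos rfl, if_pos (by omega)]
          simp only [Option.getD_some]
          exact hcval
        · rw [if_neg hq1, ← List.getD_eq_getElem?_getD]
          exact hcv q (by omega)
      obtain ⟨hiff, hsome⟩ := ih (j+1) _ pre hdrop.symm (by omega) hcl' hcv' hpl hpv
      refine ⟨?_, hsome⟩
      rw [hiff]
      constructor
      · rintro ⟨k, hk1, hk2, hk3, hk4⟩
        exact ⟨k, by omega, hk2, hk3, hk4⟩
      · rintro ⟨k, hk1, hk2, hk3, hk4⟩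
        have hkj : k ≠ j := by
          rintro rfl
          exact hstop ⟨by rw [hcval]; exact hk4, by rw [← hvg]; exact hk3⟩
        exact ⟨k, by omega, hk2, hk3, hk4⟩

theorem pvArestRows_char (grid : List (List Int)) (h w : Nat) (sh sw : Int)
    (diff : List (List Int))
    (hh : h = grid.length) (hw : ∀ row ∈ grid, row.length = w)
    (hdiff : ∀ p q, p ≤ h → q ≤ w → pvGet2 diff p q = pvDfull (pvG1 grid) h w sh sw p q) :
    ∀ (rows : List (List Int)) (i : Nat) (cnt pre : List Int),
      rows = grid.drop i → i ≤ h →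
      cnt.length = w + 1 → cnt.getD 0 0 = 0 →
      pre.length = w + 1 → (∀ q ≤ w, pre.getD q 0 = pvC (pvG1 grid) h w sh sw i q) →
      (pvArestRows diff i rows cnt pre = true ↔
        ∀ a, i ≤ a → a < h → ∀ b, b < w →
          ¬(pvG1 grid a b = 0 ∧ pvC (pvG1 grid) h w sh sw (a+1) (b+1) = 0)) := by
  intro rows
  induction rows with
  | nil =>
    intro i cnt pre hr hi hcl hc0 hpl hpv
    have hih : i = h := by
      have := List.drop_eq_nil_iff.mp hr.symm
      omega
    subst hih
    simp only [pvArestRows]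
    constructor
    · intro _ a ha1 ha2 b hb
      exact absurd ha2 (by omega)
    · intro _
      trivial
  | cons row rows ih =>
    intro i cnt pre hr hi hcl hc0 hpl hpv
    obtain ⟨hil, hrow, hdrop⟩ := pvDrop_cons grid [] i row rows hr.symm
    have hih : i < h := by omega
    have hcv0 : ∀ q ≤ 0, cnt.getD q 0 = pvC (pvG1 grid) h w sh sw (i+1) q := by
      intro q hq
      have hq0 : q = 0 := by omega
      subst hq0
      rw [hc0]
      exact (pvPS2_zero_right _ _).symm
    obtain ⟨hiff, hsome⟩ := pvArestRow_char grid h w sh sw diff i hh hw hdiff hih row 0 cnt pre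
      (by rw [List.drop_zero]; exact hrow.symm) (by omega) hcl hcv0 hpl hpv
    simp only [pvArestRows]
    cases hres : pvArestRow diff i 0 row cnt pre with
    | none =>
      obtain ⟨k, -, hk2, hk3, hk4⟩ := hiff.mp hres
      constructor
      · intro hfalse; cases hfalse
      · intro hall
        exact absurd ⟨hk3, hk4⟩ (hall i le_rfl hih k hk2)
    | some cnt' =>
      obtain ⟨hcl', hcv'⟩ := hsome cnt' hres
      have hpre0 : pre.getD 0 0 = 0 := by
        rw [hpv 0 (by omega)]
        exact pvPS2_zero_right _ _
      rw [ih (i+1) pre cnt' hdrop.symm (by omega) hpl hpre0 hcl' hcv']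
      constructor
      · intro hall a ha1 ha2 b hb hviol
        rcases Nat.eq_or_lt_of_le ha1 with hai | hai
        · have hnone : ¬(pvArestRow diff i 0 row cnt pre = none) := by
            rw [hres]; simp
          rw [hiff] at hnone
          subst hai
          exact hnone ⟨b, by omega, hb, hviol.1, hviol.2⟩
        · exact hall a (by omega) ha2 b hb hviol
      · intro hall a ha1 ha2 b hb
        exact hall a (by omega) ha2 b hb

-- swapping a 4-fold nested sum
theorem pvSum4 (s1 s2 s3 s4 : Finset ℕ) (F : ℕ → ℕ → ℕ → ℕ → Int) :
    (∑ p ∈ s1, ∑ q ∈ s2, ∑ a ∈ s3, ∑ b ∈ s4, F p q a b)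
      = ∑ a ∈ s3, ∑ b ∈ s4, ∑ p ∈ s1, ∑ q ∈ s2, F p q a b := by
  have h1 : (∑ p ∈ s1, ∑ q ∈ s2, ∑ a ∈ s3, ∑ b ∈ s4, F p q a b)
      = ∑ p ∈ s1, ∑ a ∈ s3, ∑ q ∈ s2, ∑ b ∈ s4, F p q a b :=
    Finset.sum_congr rfl (fun p _ => Finset.sum_comm)
  have h2 : (∑ p ∈ s1, ∑ a ∈ s3, ∑ q ∈ s2, ∑ b ∈ s4, F p q a b)
      = ∑ a ∈ s3, ∑ p ∈ s1, ∑ q ∈ s2, ∑ b ∈ s4, F p q a b := Finset.sum_comm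
  have h3 : (∑ a ∈ s3, ∑ p ∈ s1, ∑ q ∈ s2, ∑ b ∈ s4, F p q a b)
      = ∑ a ∈ s3, ∑ p ∈ s1, ∑ b ∈ s4, ∑ q ∈ s2, F p q a b :=
    Finset.sum_congr rfl (fun a _ => Finset.sum_congr rfl (fun p _ => Finset.sum_comm))
  have h4 : (∑ a ∈ s3, ∑ p ∈ s1, ∑ b ∈ s4, ∑ q ∈ s2, F p q a b)
      = ∑ a ∈ s3, ∑ b ∈ s4, ∑ p ∈ s1, ∑ q ∈ s2, F p q a b :=
    Finset.sum_congr rfl (fun a _ => Finset.sum_comm)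
  rw [h1, h2, h3, h4]

-- the core identity: restored coverage count = number of valid placements in the window
theorem pvCore (g : Nat → Nat → Int) (h w : Nat) (sh sw : Int) (i j : Nat)
    (hi : i < h) (hj : j < w) (hsh : 0 ≤ sh) (hsw : 0 ≤ sw) :
    pvC g h w sh sw (i+1) (j+1) =
      pvPS2 (pvOkI g h w sh sw) (i+1) (j+1)
      - pvPS2 (pvOkI g h w sh sw) (max 0 ((i : Int) - sh + 1)).toNat (j+1)
      - pvPS2 (pvOkI g h w sh sw) (i+1) (max 0 ((j : Int) - sw + 1)).toNat
      + pvPS2 (pvOkI g h w sh sw) (max 0 ((i : Int) - sh + 1)).toNat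
          (max 0 ((j : Int) - sw + 1)).toNat := by
  have hA0i : (((max 0 ((i : Int) - sh + 1)).toNat : Nat) : Int) = max 0 ((i : Int) - sh + 1) :=
    Int.toNat_of_nonneg (le_max_left _ _)
  have hB0i : (((max 0 ((j : Int) - sw + 1)).toNat : Nat) : Int) = max 0 ((j : Int) - sw + 1) :=
    Int.toNat_of_nonneg (le_max_left _ _)
  set K := pvOkI g h w sh sw with hK
  set A0 := (max 0 ((i : Int) - sh + 1)).toNat with hA0
  set B0 := (max 0 ((j : Int) - sw + 1)).toNat with hB0
  have hA0le : A0 ≤ i + 1 := by omega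
  have hB0le : B0 ≤ j + 1 := by omega
  have hsubA : Finset.Ico A0 (i+1) ⊆ Finset.range h := by
    intro x hx
    rw [Finset.mem_Ico] at hx
    rw [Finset.mem_range]
    omega
  have hsubB : Finset.Ico B0 (j+1) ⊆ Finset.range w := by
    intro x hx
    rw [Finset.mem_Ico] at hx
    rw [Finset.mem_range]
    omega
  have hRHS : pvPS2 K (i+1) (j+1) - pvPS2 K A0 (j+1) - pvPS2 K (i+1) B0 + pvPS2 K A0 B0
      = ∑ a ∈ Finset.Ico A0 (i+1), ∑ b ∈ Finset.Ico B0 (j+1), K a b := by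
    have e1 := Finset.sum_Ico_eq_sub (fun a => ∑ b ∈ Finset.range (j+1), K a b) hA0le
    have e2 := Finset.sum_Ico_eq_sub (fun a => ∑ b ∈ Finset.range B0, K a b) hA0le
    have esub : ∀ (x y z u : Int), x - y - z + u = (x - y) - (z - u) := by intros; ring
    simp only [pvPS2]
    rw [esub, ← e1, ← e2, ← Finset.sum_sub_distrib]
    exact Finset.sum_congr rfl (fun a _ => (Finset.sum_Ico_eq_sub _ hB0le).symm)
  have hD : ∀ p q, pvDfull g h w sh sw p q
      = ∑ a ∈ Finset.range h, ∑ b ∈ Finset.range w, K a b * pvDelta sh sw a b p q := by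
    intro p q
    rw [hK]
    simp [pvDfull, pvDpart]
  have hswap : pvC g h w sh sw (i+1) (j+1)
      = ∑ a ∈ Finset.range h, ∑ b ∈ Finset.range w, ∑ p ∈ Finset.range (i+1),
          ∑ q ∈ Finset.range (j+1), K a b * pvDelta sh sw a b p q := by
    have : pvC g h w sh sw (i+1) (j+1)
        = ∑ p ∈ Finset.range (i+1), ∑ q ∈ Finset.range (j+1),
            ∑ a ∈ Finset.range h, ∑ b ∈ Finset.range w, K a b * pvDelta sh sw a b p q := by
      simp only [pvC, pvPS2]
      exact Finset.sum_congr rfl (fun p _ => Finset.sum_congr rfl (fun q _ => hD p q))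
    rw [this, pvSum4]
  have hSp : ∀ a : Nat, (∑ p ∈ Finset.range (i+1),
        ((if p = a then (1:Int) else 0) - if p = ((a:Int)+sh).toNat then 1 else 0))
      = (if a < i+1 then (1:Int) else 0) - (if ((a:Int)+sh).toNat < i+1 then 1 else 0) := by
    intro a
    rw [Finset.sum_sub_distrib, Finset.sum_ite_eq' (Finset.range (i+1)) a (fun _ => (1:Int)),
      Finset.sum_ite_eq' (Finset.range (i+1)) (((a:Int)+sh).toNat) (fun _ => (1:Int))]
    simp [Finset.mem_range]
  have hSq : ∀ b : Nat, (∑ q ∈ Finset.range (j+1),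
        ((if q = b then (1:Int) else 0) - if q = ((b:Int)+sw).toNat then 1 else 0))
      = (if b < j+1 then (1:Int) else 0) - (if ((b:Int)+sw).toNat < j+1 then 1 else 0) := by
    intro b
    rw [Finset.sum_sub_distrib, Finset.sum_ite_eq' (Finset.range (j+1)) b (fun _ => (1:Int)),
      Finset.sum_ite_eq' (Finset.range (j+1)) (((b:Int)+sw).toNat) (fun _ => (1:Int))]
    simp [Finset.mem_range]
  have hfac : ∀ a b, (∑ p ∈ Finset.range (i+1), ∑ q ∈ Finset.range (j+1),
        K a b * pvDelta sh sw a b p q)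
      = K a b * (((if a < i+1 then (1:Int) else 0) - (if ((a:Int)+sh).toNat < i+1 then 1 else 0))
          * ((if b < j+1 then (1:Int) else 0) - (if ((b:Int)+sw).toNat < j+1 then 1 else 0))) := by
    intro a b
    rw [← hSp a, ← hSq b, Finset.sum_mul_sum]
    simp only [Finset.mul_sum, pvDelta]
  have hpt : ∀ a ∈ Finset.range h, ∀ b ∈ Finset.range w,
      K a b * (((if a < i+1 then (1:Int) else 0) - (if ((a:Int)+sh).toNat < i+1 then 1 else 0))
          * ((if b < j+1 then (1:Int) else 0) - (if ((b:Int)+sw).toNat < j+1 then 1 else 0)))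
      = if a ∈ Finset.Ico A0 (i+1) then (if b ∈ Finset.Ico B0 (j+1) then K a b else 0) else 0 := by
    intro a ha b hb
    rw [Finset.mem_range] at ha hb
    simp only [Finset.mem_Ico]
    by_cases hk : g a b = 0 ∧ (a : Int) + sh ≤ (h : Int) ∧ (b : Int) + sw ≤ (w : Int) ∧
        pvPS2 g ((a : Int) + sh).toNat ((b : Int) + sw).toNat -
          pvPS2 g ((a : Int) + sh).toNat b - pvPS2 g a ((b : Int) + sw).toNat + pvPS2 g a b = 0
    · have hK1 : K a b = 1 := by rw [hK, pvOkI, if_pos hk]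
      obtain ⟨-, hsa, hsb, -⟩ := hk
      rw [hK1]
      split_ifs <;> first | omega | norm_num
    · have hK0 : K a b = 0 := by rw [hK, pvOkI, if_neg hk]
      rw [hK0]
      split_ifs <;> norm_num
  have hfinal : (∑ a ∈ Finset.range h, ∑ b ∈ Finset.range w,
        (if a ∈ Finset.Ico A0 (i+1) then (if b ∈ Finset.Ico B0 (j+1) then K a b else 0) else 0))
      = ∑ a ∈ Finset.Ico A0 (i+1), ∑ b ∈ Finset.Ico B0 (j+1), K a b := by
    have hinner : ∀ a, (∑ b ∈ Finset.range w,
          if a ∈ Finset.Ico A0 (i+1) then (if b ∈ Finset.Ico B0 (j+1) then K a b else 0) else 0)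
        = if a ∈ Finset.Ico A0 (i+1) then
            (∑ b ∈ Finset.range w, if b ∈ Finset.Ico B0 (j+1) then K a b else 0) else 0 := by
      intro a
      by_cases hmem : a ∈ Finset.Ico A0 (i+1)
      · simp only [if_pos hmem]
      · simp only [if_neg hmem, Finset.sum_const_zero]
    rw [Finset.sum_congr rfl (fun a _ => hinner a), Finset.sum_ite_mem,
      Finset.inter_eq_right.mpr hsubA]
    exact Finset.sum_congr rfl (fun a _ => by
      rw [Finset.sum_ite_mem, Finset.inter_eq_right.mpr hsubB])
  calc pvC g h w sh sw (i+1) (j+1)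
      = ∑ a ∈ Finset.range h, ∑ b ∈ Finset.range w, ∑ p ∈ Finset.range (i+1),
          ∑ q ∈ Finset.range (j+1), K a b * pvDelta sh sw a b p q := hswap
    _ = ∑ a ∈ Finset.range h, ∑ b ∈ Finset.range w,
          (if a ∈ Finset.Ico A0 (i+1) then (if b ∈ Finset.Ico B0 (j+1) then K a b else 0) else 0) :=
        Finset.sum_congr rfl (fun a ha => Finset.sum_congr rfl (fun b hb => by
          rw [hfac a b]; exact hpt a ha b hb))
    _ = ∑ a ∈ Finset.Ico A0 (i+1), ∑ b ∈ Finset.Ico B0 (j+1), K a b := hfinal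
    _ = _ := hRHS.symm

-- a grid without empty cells: the restoration loop never hits its early return
theorem pvArestRow_nz (diff : List (List Int)) (i : Nat) :
    ∀ (vs : List Int) (j : Nat) (cnt pre : List Int), (∀ x ∈ vs, x ≠ 0) →
      pvArestRow diff i j vs cnt pre ≠ none := by
  intro vs
  induction vs with
  | nil => intro j cnt pre _; simp [pvArestRow]
  | cons v vs ih =>
    intro j cnt pre hnz
    simp only [pvArestRow]
    rw [if_neg (fun hc => hnz v (by simp) hc.2)]
    exact ih (j+1) _ pre (fun x hx => hnz x (by simp [hx]))

theorem pvArestRows_nz (diff : List (List Int)) :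
    ∀ (rows : List (List Int)) (i : Nat) (cnt pre : List Int),
      (∀ row ∈ rows, ∀ x ∈ row, x ≠ 0) → pvArestRows diff i rows cnt pre = true := by
  intro rows
  induction rows with
  | nil => intro i cnt pre _; rfl
  | cons row rows ih =>
    intro i cnt pre hnz
    simp only [pvArestRows]
    cases hres : pvArestRow diff i 0 row cnt pre with
    | none => exact absurd hres (pvArestRow_nz diff i row 0 cnt pre (hnz row (by simp)))
    | some cnt' => exact ih (i+1) pre cnt' (fun r hr => hnz r (by simp [hr]))

theorem pvG1_ne (grid : List (List Int)) (hnz : ∀ row ∈ grid, ∀ x ∈ row, x ≠ 0)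
    (i j : Nat) (hi : i < grid.length) : pvG1 grid i j ≠ 0 := by
  by_cases hjl : j < (grid.getD i []).length
  · have hval : pvG1 grid i j = (grid.getD i [])[j] := by
      simp only [pvG1]
      rw [List.getD_eq_getElem?_getD, List.getElem?_eq_getElem hjl]
      rfl
    rw [hval]
    exact hnz _ (pvRow_mem grid i hi) _ (List.getElem_mem hjl)
  · have hval : pvG1 grid i j = 1 := by
      simp only [pvG1]
      rw [List.getD_eq_getElem?_getD, List.getElem?_eq_none (by omega), Option.getD_none]
    rw [hval]
    decide

theorem pvAlt_nz (grid : List (List Int)) (sh sw : Int)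
    (hnz : ∀ row ∈ grid, ∀ x ∈ row, x ≠ 0) : possibleToStamp_alt grid sh sw = true := by
  simp only [possibleToStamp_alt]
  rw [List.all_eq_true]
  intro i hi
  rw [List.all_eq_true]
  intro j hj
  rw [List.mem_range] at hi
  rw [if_neg (pvG1_ne grid hnz i j hi)]

-- ===== VERDICT (by name: the statement is the Claim_ definition above) =====
theorem possibleToStamp_spec : Claim_equal_possibleToStamp := by
  unfold Claim_equal_possibleToStamp
  intro grid sh sw hdom hpre
  unfold Spec_possibleToStamp
  obtain ⟨hne, hle, hbr⟩ := hpre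
  rcases hbr with ⟨hrect, hsh, hsw⟩ | hnz
  swap
  · -- no empty cell: both programs return True
    have hA : possibleToStamp grid sh sw = true :=
      pvArestRows_nz _ grid 0 _ _ hnz
    rw [hA, pvAlt_nz grid sh sw hnz]
  set h := grid.length with hh
  set w := (grid.getD 0 []).length with hwdef
  have hw : ∀ row ∈ grid, row.length = w := by
    intro row hr
    rw [hrect row hr, hwdef]
    cases grid with
    | nil => exact absurd rfl hne
    | cons r rs => rfl
  -- A side: characterize the three phases
  have hsumF := pvAsumRows_char grid h w hh hw grid 0 (pvZeros2 (h+1) (w+1)) (by simp)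
    (by omega) (pvFilled_zero _ h w)
  have hsum : ∀ p q, p ≤ h → q ≤ w →
      pvGet2 (pvAsumRows 0 grid (pvZeros2 (h+1) (w+1))) p q = pvPS2 (pvG1 grid) p q :=
    fun p q hp hq => pvFilled_get _ h w _ hsumF p q hp hq
  have hdiffF := pvAdiffRows_char grid h w sh sw _ hh hw hsh hsw hsum grid 0
    (pvZeros2 (h+1) (w+1)) (by simp) (by omega) (pvDState_zero _ h w sh sw)
  have hdiff : ∀ p q, p ≤ h → q ≤ w →
      pvGet2 (pvAdiffRows h w sh sw (pvAsumRows 0 grid (pvZeros2 (h+1) (w+1))) 0 grid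
        (pvZeros2 (h+1) (w+1))) p q = pvDfull (pvG1 grid) h w sh sw p q := by
    intro p q hp hq
    obtain ⟨-, hget⟩ := hdiffF
    rw [hget p q, if_pos ⟨hp, hq⟩]
    rfl
  have hArest := pvArestRows_char grid h w sh sw _ hh hw hdiff grid 0
    (List.replicate (w+1) 0) (List.replicate (w+1) 0) (by simp) (by omega)
    (by simp) (pvRepl0 _ _) (by simp)
    (by
      intro q hq
      rw [pvRepl0]
      exact (pvPS2_zero_left _ _).symm)
  have hAiff : possibleToStamp grid sh sw = true ↔
      ∀ a, a < h → ∀ b, b < w →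
        ¬(pvG1 grid a b = 0 ∧ pvC (pvG1 grid) h w sh sw (a+1) (b+1) = 0) := by
    show pvArestRows _ 0 grid _ _ = true ↔ _
    rw [hArest]
    constructor
    · intro hall a ha b hb; exact hall a (by omega) ha b hb
    · intro hall a _ ha b hb; exact hall a ha b hb
  -- B side: characterize the tables it reads
  have hSget : ∀ p q, p ≤ h → q ≤ w →
      pvGet2 (pvPrefFill h w (pvG1 grid)) p q = pvPS2 (pvG1 grid) p q :=
    fun p q hp hq => pvFilled_get _ h w _ (pvPrefFill_char _ h w) p q hp hq
  have hokEq : ∀ a b, a < h → b < w →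
      pvOkTab grid h w (pvPrefFill h w (pvG1 grid)) sh sw a b = pvOkI (pvG1 grid) h w sh sw a b := by
    intro a b ha hb
    rw [pvOkTab, pvOkI]
    by_cases hg : (a : Int) + sh ≤ (h : Int) ∧ (b : Int) + sw ≤ (w : Int)
    · obtain ⟨h1, h2⟩ := hg
      rw [hSget _ _ (by omega) (by omega), hSget _ _ (by omega) (by omega),
        hSget _ _ (by omega) (by omega), hSget _ _ (by omega) (by omega)]
    · rw [if_neg (fun hc => hg ⟨hc.2.1, hc.2.2.1⟩), if_neg (fun hc => hg ⟨hc.2.1, hc.2.2.1⟩)]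
  have hPSok : ∀ x y, x ≤ h → y ≤ w →
      pvPS2 (pvOkTab grid h w (pvPrefFill h w (pvG1 grid)) sh sw) x y
        = pvPS2 (pvOkI (pvG1 grid) h w sh sw) x y := by
    intro x y hx hy
    simp only [pvPS2]
    refine Finset.sum_congr rfl (fun a ha => Finset.sum_congr rfl (fun b hb => ?_))
    rw [Finset.mem_range] at ha hb
    exact hokEq a b (by omega) (by omega)
  have hVget : ∀ p q, p ≤ h → q ≤ w →
      pvGet2 (pvPrefFill h w (pvOkTab grid h w (pvPrefFill h w (pvG1 grid)) sh sw)) p q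
        = pvPS2 (pvOkI (pvG1 grid) h w sh sw) p q := by
    intro p q hp hq
    rw [pvFilled_get _ h w _ (pvPrefFill_char _ h w) p q hp hq]
    exact hPSok p q hp hq
  have hBiff : possibleToStamp_alt grid sh sw = true ↔
      ∀ i, i < h → ∀ j, j < w → pvG1 grid i j = 0 →
        pvPS2 (pvOkI (pvG1 grid) h w sh sw) (i+1) (j+1)
          - pvPS2 (pvOkI (pvG1 grid) h w sh sw) (max 0 ((i : Int) - sh + 1)).toNat (j+1)
          - pvPS2 (pvOkI (pvG1 grid) h w sh sw) (i+1) (max 0 ((j : Int) - sw + 1)).toNat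
          + pvPS2 (pvOkI (pvG1 grid) h w sh sw) (max 0 ((i : Int) - sh + 1)).toNat
              (max 0 ((j : Int) - sw + 1)).toNat ≠ 0 := by
    show (List.range h).all _ = true ↔ _
    rw [List.all_eq_true]
    constructor
    · intro hall i hi j hj hg
      have h1 := hall i (List.mem_range.mpr hi)
      rw [List.all_eq_true] at h1
      have h2 := h1 j (List.mem_range.mpr hj)
      rw [if_pos hg] at h2
      rw [bne_iff_ne] at h2
      have hA0 : (max 0 ((i : Int) - sh + 1)).toNat ≤ i + 1 := by
        have := Int.toNat_of_nonneg (le_max_left 0 ((i : Int) - sh + 1))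
        omega
      have hB0 : (max 0 ((j : Int) - sw + 1)).toNat ≤ j + 1 := by
        have := Int.toNat_of_nonneg (le_max_left 0 ((j : Int) - sw + 1))
        omega
      rw [hVget _ _ (by omega) (by omega), hVget _ _ (by omega) (by omega),
        hVget _ _ (by omega) (by omega), hVget _ _ (by omega) (by omega)] at h2
      exact h2
    · intro hall i hi
      rw [List.mem_range] at hi
      rw [List.all_eq_true]
      intro j hj
      rw [List.mem_range] at hj
      by_cases hg : pvG1 grid i j = 0
      · rw [if_pos hg, bne_iff_ne]
        have hA0 : (max 0 ((i : Int) - sh + 1)).toNat ≤ i + 1 := by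
          have := Int.toNat_of_nonneg (le_max_left 0 ((i : Int) - sh + 1))
          omega
        have hB0 : (max 0 ((j : Int) - sw + 1)).toNat ≤ j + 1 := by
          have := Int.toNat_of_nonneg (le_max_left 0 ((j : Int) - sw + 1))
          omega
        rw [hVget _ _ (by omega) (by omega), hVget _ _ (by omega) (by omega),
          hVget _ _ (by omega) (by omega), hVget _ _ (by omega) (by omega)]
        exact hall i hi j hj hg
      · rw [if_neg hg]
  rw [Bool.eq_iff_iff, hAiff, hBiff]
  constructor
  · intro hall i hi j hj hg
    rw [← pvCore (pvG1 grid) h w sh sw i j hi hj hsh hsw]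
    intro hc
    exact hall i hi j hj ⟨hg, hc⟩
  · intro hall a ha b hb hviol
    have := hall a ha b hb hviol.1
    rw [← pvCore (pvG1 grid) h w sh sw a b ha hb hsh hsw] at this
    exact this hviol.2
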